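-- pv_equiv track=rewrite | github.com/felix300F/inkstitch | lib/stitches/ripple_stitch.py | repeat_coords
-- ===== SOURCE A (Python) =====
-- def repeat_coords(coords, repeats):
--     final_coords = []
--     for i in range(repeats):
--         if i % 2 == 1:
--             # reverse every other pass
--             this_coords = coords[::-1]
--         else:
--             this_coords = coords[:]
--
--         final_coords.extend(this_coords)
--     return final_coords
-- ===== SOURCE B (Python) =====
-- def repeat_coords(coords, repeats):
--     n = max(repeats, 0)
--     block = coords + coords[::-1]
--     return block * (n // 2) + (coords[:] if n % 2 else [])
-- ===== Notes on version B (the rewrite author's own statement) =====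
-- stated objective: simpler
-- what changed: Replaces the per-iteration parity branch with block repetition: one forward+reversed block repeated n//2 times plus a single forward copy when n is odd.
import Mathlib
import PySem

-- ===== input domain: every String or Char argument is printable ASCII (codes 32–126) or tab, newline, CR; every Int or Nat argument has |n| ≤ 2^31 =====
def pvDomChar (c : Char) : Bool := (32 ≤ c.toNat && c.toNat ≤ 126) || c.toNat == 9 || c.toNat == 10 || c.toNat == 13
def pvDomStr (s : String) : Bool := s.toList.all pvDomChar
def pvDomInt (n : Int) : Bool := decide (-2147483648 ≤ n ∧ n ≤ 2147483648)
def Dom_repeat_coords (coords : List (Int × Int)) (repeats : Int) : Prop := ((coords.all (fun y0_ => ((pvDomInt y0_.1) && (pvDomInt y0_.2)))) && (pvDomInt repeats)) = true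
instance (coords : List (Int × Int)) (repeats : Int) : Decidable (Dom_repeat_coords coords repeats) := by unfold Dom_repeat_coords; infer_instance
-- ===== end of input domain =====

-- ===== PORT A =====
-- A: fold over range(repeats), appending coords or its reverse depending on the pass parity.
def repeat_coords (coords : List (Int × Int)) (repeats : Int) : List (Int × Int) :=
  (PySem.List.pyRange 0 repeats 1).foldl
    (fun final_coords i =>
      final_coords ++ (if PySem.Int.mod i 2 = 1 then coords.reverse else coords))
    []

-- ===== PORT B =====
-- B: one forward+reversed block repeated n//2 times, plus one forward copy if n is odd.
def repeat_coords_alt (coords : List (Int × Int)) (repeats : Int) : List (Int × Int) :=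
  let n := max repeats 0
  let block := coords ++ coords.reverse
  (List.replicate (PySem.Int.floordiv n 2).toNat block).flatten
    ++ (if PySem.Int.mod n 2 ≠ 0 then coords else [])

-- ===== PRECONDITION & SPEC =====
def Spec_repeat_coords (coords : List (Int × Int)) (repeats : Int) (out : List (Int × Int)) : Prop := out = repeat_coords_alt coords repeats
instance (coords : List (Int × Int)) (repeats : Int) (out : List (Int × Int)) : Decidable (Spec_repeat_coords coords repeats out) := by unfold Spec_repeat_coords; infer_instance

-- ===== CLAIM (what is proved, stated in full; the proofs are below) =====
def Claim_equal_repeat_coords : Prop := ∀ (coords : List (Int × Int)) (repeats : Int), Dom_repeat_coords coords repeats → Spec_repeat_coords coords repeats (repeat_coords coords repeats)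

-- ===== LEMMAS AND PROOFS =====

-- B's value restated for a natural-number count.
def altN (coords : List (Int × Int)) (n : Nat) : List (Int × Int) :=
  (List.replicate (n / 2) (coords ++ coords.reverse)).flatten
    ++ (if n % 2 = 1 then coords else [])

lemma altN_succ (coords : List (Int × Int)) (n : Nat) :
    altN coords (n + 1)
      = altN coords n ++ (if (n : Int) % 2 = 1 then coords.reverse else coords) := by
  rcases Nat.even_or_odd n with ⟨m, hm⟩ | ⟨m, hm⟩
  · subst hm
    have h1 : (m + m + 1) / 2 = m := by omega
    have h2 : (m + m) / 2 = m := by omega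
    have h3 : (m + m + 1) % 2 = 1 := by omega
    have h4 : (m + m) % 2 = 0 := by omega
    have h5 : ¬ ((m : Int) + m) % 2 = 1 := by omega
    simp [altN, h1, h2, h3, h4, h5]
  · subst hm
    have h1 : (2 * m + 1 + 1) / 2 = m + 1 := by omega
    have h2 : (2 * m + 1) / 2 = m := by omega
    have h3 : (2 * m + 1 + 1) % 2 = 0 := by omega
    have h4 : (2 * m + 1) % 2 = 1 := by omega
    have h5 : ((2 * (m : Int) + 1)) % 2 = 1 := by omega
    simp [altN, h1, h2, h3, h4, h5, List.replicate_succ', List.flatten_append,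
      List.append_assoc]

lemma repeat_coords_nat (coords : List (Int × Int)) (n : Nat) :
    repeat_coords coords (n : Int) = altN coords n := by
  induction n with
  | zero => simp [repeat_coords, altN]
  | succ k ih =>
    have hr : PySem.List.pyRange 0 ((k : Int) + 1) 1
        = PySem.List.pyRange 0 (k : Int) 1 ++ [(k : Int)] := by
      simpa using PySem.List.pyRange_one_succ_right (a := 0) (b := (k : Int)) (by omega)
    have : repeat_coords coords ((k : Int) + 1)
        = repeat_coords coords (k : Int)
          ++ (if PySem.Int.mod (k : Int) 2 = 1 then coords.reverse else coords) := by
      simp [repeat_coords, hr, List.foldl_append]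
    rw [show (((k + 1 : Nat)) : Int) = ((k : Int) + 1) by push_cast; ring,
      this, ih, altN_succ,
      PySem.Int.mod_eq_emod_of_pos (by norm_num : (0:Int) < 2)]

lemma alt_eq_altN (coords : List (Int × Int)) (n : Nat) :
    repeat_coords_alt coords (n : Int) = altN coords n := by
  have hmax : max (n : Int) 0 = (n : Int) := by omega
  have hdiv : (PySem.Int.floordiv (n : Int) 2).toNat = n / 2 := by
    rw [PySem.Int.floordiv_eq_ediv_of_pos (by norm_num : (0:Int) < 2)]; omega
  have hmod : PySem.Int.mod (n : Int) 2 = (n : Int) % 2 :=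
    PySem.Int.mod_eq_emod_of_pos (by norm_num : (0:Int) < 2)
  have hind : ((n : Int) % 2 ≠ 0) ↔ (n % 2 = 1) := by omega
  simp only [repeat_coords_alt, hmax, hdiv, hmod, altN]
  by_cases h : n % 2 = 1
  · simp [h, hind.mpr h]
  · have : ¬ ((n : Int) % 2 ≠ 0) := by omega
    simp [h, this]

-- ===== VERDICT (by name: the statement is the Claim_ definition above) =====
theorem repeat_coords_spec : Claim_equal_repeat_coords := by
  intro coords repeats _
  unfold Spec_repeat_coords
  by_cases h : repeats ≤ 0
  · have hr : PySem.List.pyRange 0 repeats 1 = [] := by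
      simp [PySem.List.pyRange_one]
      omega
    have hm : max repeats 0 = 0 := by omega
    simp [repeat_coords, repeat_coords_alt, hr, hm]
  · obtain ⟨n, rfl⟩ : ∃ n : Nat, repeats = (n : Int) :=
      ⟨repeats.toNat, by omega⟩
    rw [repeat_coords_nat, alt_eq_altN]
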